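-- pv_equiv track=rewrite | github.com/calebjcourtney/advent-of-code | 2016/python/day14.py | valid_key_indexes
-- ===== SOURCE A (Python) =====
-- def valid_key_indexes(threes: set[int], fives: set[int]) -> set[int]:
--     output = set()
--     for x in threes:
--         for y in fives:
--             if 1 <= y - x <= 1000:
--                 output.add(x)
--                 continue
--
--     return output
-- ===== SOURCE B (Python) =====
-- def valid_key_indexes(threes: set[int], fives: set[int]) -> set[int]:
--     sf = sorted(fives)
--     output = set()
--     for x in threes:
--         # binary search: first index whose element is > x
--         lo, hi = 0, len(sf)
--         while lo < hi:
--             mid = (lo + hi) // 2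
--             if sf[mid] <= x:
--                 lo = mid + 1
--             else:
--                 hi = mid
--         if lo < len(sf) and sf[lo] - x <= 1000:
--             output.add(x)
--     return output
-- ===== Notes on version B (the rewrite author's own statement) =====
-- stated objective: faster
-- what changed: B sorts fives once and binary-searches the first element greater than x for each x, replacing A's full inner scan of fives per element of threes.
import Mathlib
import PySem

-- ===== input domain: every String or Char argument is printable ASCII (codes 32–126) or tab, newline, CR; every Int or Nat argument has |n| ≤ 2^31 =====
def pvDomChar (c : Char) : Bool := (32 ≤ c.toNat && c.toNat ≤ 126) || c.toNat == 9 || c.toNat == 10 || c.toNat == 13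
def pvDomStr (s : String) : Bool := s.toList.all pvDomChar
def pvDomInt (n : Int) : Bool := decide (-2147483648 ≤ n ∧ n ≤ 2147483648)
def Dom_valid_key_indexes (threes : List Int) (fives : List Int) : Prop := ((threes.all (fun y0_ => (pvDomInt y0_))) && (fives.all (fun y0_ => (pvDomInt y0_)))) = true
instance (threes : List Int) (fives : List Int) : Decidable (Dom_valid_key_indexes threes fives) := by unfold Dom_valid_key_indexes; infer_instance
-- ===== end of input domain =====

-- B sorts `fives` once and binary-searches, per x, the first element greater than x
-- (instead of A's full inner scan of `fives` for every x): a faster algorithm, same result.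

-- ===== PORT A =====
def valid_key_indexes (threes : List Int) (fives : List Int) : List Int :=
  threes.foldl (fun output x =>
    fives.foldl (fun output y =>
      if 1 ≤ y - x ∧ y - x ≤ 1000 then PySem.Set.add output x else output) output)
    PySem.Set.empty

-- ===== PORT B =====
-- the `while lo < hi` binary-search loop of Source B (sf[mid] is always in range there,
-- so the default-0 read is exact)
def vkiSearch (sf : List Int) (x : Int) (lo hi : Nat) : Nat :=
  if _h : lo < hi then
    let mid := (lo + hi) / 2
    if sf.getD mid 0 ≤ x then vkiSearch sf x (mid + 1) hi else vkiSearch sf x lo mid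
  else lo
termination_by hi - lo
decreasing_by all_goals omega

def valid_key_indexes_alt (threes : List Int) (fives : List Int) : List Int :=
  let sf := PySem.List.sorted fives (fun y => y) false
  threes.foldl (fun output x =>
    let lo := vkiSearch sf x 0 sf.length
    if lo < sf.length ∧ sf.getD lo 0 - x ≤ 1000 then PySem.Set.add output x else output)
    PySem.Set.empty

-- ===== PRECONDITION & SPEC =====
def Spec_valid_key_indexes (threes : List Int) (fives : List Int) (out : List Int) : Prop := out = valid_key_indexes_alt threes fives
instance (threes : List Int) (fives : List Int) (out : List Int) : Decidable (Spec_valid_key_indexes threes fives out) := by unfold Spec_valid_key_indexes; infer_instance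

-- ===== CLAIM (what is proved, stated in full; the proofs are below) =====
def Claim_equal_valid_key_indexes : Prop := ∀ (threes : List Int) (fives : List Int), Dom_valid_key_indexes threes fives → Spec_valid_key_indexes threes fives (valid_key_indexes threes fives)

-- ===== LEMMAS AND PROOFS =====

theorem set_add_idem (s : PySem.Set Int) (x : Int) :
    PySem.Set.add (PySem.Set.add s x) x = PySem.Set.add s x := by
  simp [PySem.Set.add, PySem.Set.contains]
  split_ifs with h1 <;> simp_all

-- A's inner loop over `fives` adds x exactly when some y ∈ fives is in (x, x+1000]
theorem innerA (fives : List Int) (x : Int) (out : PySem.Set Int) :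
    fives.foldl (fun output y =>
      if 1 ≤ y - x ∧ y - x ≤ 1000 then PySem.Set.add output x else output) out
    = if ∃ y ∈ fives, 1 ≤ y - x ∧ y - x ≤ 1000 then PySem.Set.add out x else out := by
  induction fives generalizing out with
  | nil => simp
  | cons z zs ih =>
    by_cases hz : 1 ≤ z - x ∧ z - x ≤ 1000
    · simp only [List.foldl_cons, if_pos hz, ih]
      have : ∃ y ∈ z :: zs, 1 ≤ y - x ∧ y - x ≤ 1000 := ⟨z, by simp, hz⟩
      rw [if_pos this]
      split_ifs with h
      · exact set_add_idem out x
      · rfl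
    · simp only [List.foldl_cons, if_neg hz, ih]
      by_cases h : ∃ y ∈ zs, 1 ≤ y - x ∧ y - x ≤ 1000
      · rw [if_pos h, if_pos (by obtain ⟨y, hy, hc⟩ := h; exact ⟨y, by simp [hy], hc⟩)]
      · rw [if_neg h, if_neg (by rintro ⟨y, hy, hc⟩; rcases List.mem_cons.mp hy with rfl | hy
                                 exacts [hz hc, h ⟨y, hy, hc⟩])]

-- binary-search invariant: the result r splits sf at x — everything before r is ≤ x,
-- everything from r on is > x (sf monotone on reads)
theorem vkiSearch_spec (sf : List Int) (x : Int) (lo hi : Nat)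
    (hmono : ∀ i j : Nat, i ≤ j → j < sf.length → sf.getD i 0 ≤ sf.getD j 0)
    (hlohi : lo ≤ hi) (hhi : hi ≤ sf.length)
    (hlo : ∀ j, j < lo → sf.getD j 0 ≤ x)
    (hhi2 : ∀ j, hi ≤ j → j < sf.length → x < sf.getD j 0) :
    (∀ j, j < vkiSearch sf x lo hi → sf.getD j 0 ≤ x) ∧
    (∀ j, vkiSearch sf x lo hi ≤ j → j < sf.length → x < sf.getD j 0) ∧
    vkiSearch sf x lo hi ≤ sf.length := by
  induction lo, hi using vkiSearch.induct sf x with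
  | case1 lo hi h mid hle ih =>
    rw [vkiSearch, dif_pos h, if_pos (by simpa [mid] using hle)]
    refine ih (by simp only [mid]; omega) hhi (fun j hj => ?_) hhi2
    have hmid : mid < sf.length := by simp only [mid]; omega
    exact le_trans (hmono j mid (by omega) hmid) hle
  | case2 lo hi h mid hgt ih =>
    rw [vkiSearch, dif_pos h, if_neg (by simpa [mid] using hgt)]
    refine ih (by simp only [mid]; omega) (by simp only [mid]; omega) hlo (fun j hj hjl => ?_)
    have hxm : x < sf.getD mid 0 := lt_of_not_ge hgt
    rcases Nat.lt_or_ge j hi with h' | h'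
    · exact lt_of_lt_of_le hxm (hmono mid j (by omega) hjl)
    · exact hhi2 j h' hjl
  | case3 lo hi h =>
    rw [vkiSearch, dif_neg h]
    exact ⟨hlo, fun j hj => hhi2 j (by omega), by omega⟩

-- keep-condition of B's step ↔ keep-condition of A's step
theorem keep_iff (fives : List Int) (x : Int) (sf : List Int)
    (hmem : ∀ y : Int, y ∈ sf ↔ y ∈ fives)
    (hpw : sf.Pairwise (· ≤ ·)) :
    (vkiSearch sf x 0 sf.length < sf.length ∧
      sf.getD (vkiSearch sf x 0 sf.length) 0 - x ≤ 1000)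
    ↔ ∃ y ∈ fives, 1 ≤ y - x ∧ y - x ≤ 1000 := by
  have hmono : ∀ i j : Nat, i ≤ j → j < sf.length → sf.getD i 0 ≤ sf.getD j 0 := by
    intro i j hij hj
    rcases Nat.eq_or_lt_of_le hij with rfl | hlt
    · exact le_refl _
    · have := (List.pairwise_iff_getElem.mp hpw) i j (by omega) hj hlt
      rw [List.getD_eq_getElem _ _ (by omega), List.getD_eq_getElem _ _ hj]
      exact this
  obtain ⟨h1, h2, h3⟩ := vkiSearch_spec sf x 0 sf.length hmono (Nat.zero_le _) le_rfl
    (fun j hj => absurd hj (by omega)) (fun j hj hjl => absurd hjl (by omega))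
  set r := vkiSearch sf x 0 sf.length with hr
  constructor
  · rintro ⟨hrl, hle⟩
    refine ⟨sf.getD r 0, ?_, ?_, by omega⟩
    · rw [← hmem, List.getD_eq_getElem _ _ hrl]; exact List.getElem_mem _
    · have := h2 r le_rfl hrl; omega
  · rintro ⟨y, hy, hy1, hy2⟩
    obtain ⟨j, hjl, hje⟩ := List.mem_iff_getElem.mp ((hmem y).mpr hy)
    have hyD : sf.getD j 0 = y := by rw [List.getD_eq_getElem _ _ hjl, hje]
    have hrj : r ≤ j := by
      by_contra hc
      have := h1 j (by omega); omega
    have := hmono r j hrj hjl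
    exact ⟨by omega, by omega⟩

-- ===== VERDICT (by name: the statement is the Claim_ definition above) =====
theorem valid_key_indexes_spec : Claim_equal_valid_key_indexes := by
  intro threes fives _
  unfold Spec_valid_key_indexes valid_key_indexes valid_key_indexes_alt
  simp only []
  congr 1
  funext out x
  rw [innerA]
  have hiff := keep_iff fives x (PySem.List.sorted fives (fun y => y) false)
    (fun y => PySem.List.mem_sorted fives (fun y => y) false y)
    (PySem.List.sorted_pairwise fives (fun y => y))
  rw [if_congr hiff.symm rfl rfl]
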